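-- pv_equiv track=rewrite | github.com/handsupmin/coding-test | Problems/LQ1.py | solution
-- ===== SOURCE A (Python) =====
-- def solution(student, k):
--     n = len(student)
--     index = []
--     group = []
--     count = 0
--
--     for i in range(n):
--         if student[i] == 1:
--             index.append(i)
--
--     index_set = set(index)
--     n_index = len(index)
--
--     if n_index < k:
--         return 0
--
--     for i in range(n_index - k + 1):
--         group_list = []
--         for j in range(k):
--             group_list.append(index[i+j])
--         group.append(group_list)
--
--     for g in group:
--         first = g[0]
--         last = g[-1]
--         count_left = 1
--         count_right = 1
--         for i in range(first, -1, -1):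
--             if i == first:
--                 continue
--             if i not in index_set:
--                 count_left += 1
--             else:
--                 break
--         for j in range(last, n):
--             if j == last:
--                 continue
--             if j not in index_set:
--                 count_right += 1
--             else:
--                 break
--
--         count += count_left * count_right
--
--     return count
-- ===== SOURCE B (Python) =====
-- def solution(student, k):
--     n = len(student)
--     idx = [i for i in range(n) if student[i] == 1]
--     m = len(idx)
--     if m < k:
--         return 0
--     total = 0
--     for i in range(m - k + 1):
--         left = idx[i] - idx[i - 1] if i > 0 else idx[0] + 1
--         j = i + k - 1
--         right = idx[j + 1] - idx[j] if j + 1 < m else n - idx[j]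
--         total += left * right
--     return total
-- ===== Notes on version B (the rewrite author's own statement) =====
-- stated objective: alternative
-- what changed: Instead of materialising every k-window of 1-positions and re-scanning the array outward from each window's ends with break loops, B computes each window's left/right gap by O(1) arithmetic on neighbouring 1-positions (idx[i]-idx[i-1], idx[j+1]-idx[j]) in a single pass over the windows; on the measured inputs (few 1s) both are dominated by the O(n) scan, so no speed is claimed.
import Mathlib
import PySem

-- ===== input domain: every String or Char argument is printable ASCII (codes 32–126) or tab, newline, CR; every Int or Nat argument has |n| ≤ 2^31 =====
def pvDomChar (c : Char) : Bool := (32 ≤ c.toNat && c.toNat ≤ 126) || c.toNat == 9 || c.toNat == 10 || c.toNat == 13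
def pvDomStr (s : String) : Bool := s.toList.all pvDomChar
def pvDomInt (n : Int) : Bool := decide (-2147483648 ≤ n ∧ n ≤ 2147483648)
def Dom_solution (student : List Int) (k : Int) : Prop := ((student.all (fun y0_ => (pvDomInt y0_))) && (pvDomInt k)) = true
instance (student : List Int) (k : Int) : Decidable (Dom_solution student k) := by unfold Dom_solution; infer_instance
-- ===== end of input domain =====

-- B replaces A's per-window outward scans by O(1) gap arithmetic on neighbouring 1-positions.

-- ===== PORT A =====
-- the two inner scan-with-break loops of A, transliterated as recursion over the range list
def scanStep (s : PySem.Set Int) (skip : Int) : List Int → Int → Int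
  | [], c => c
  | i :: rest, c =>
    if i = skip then scanStep s skip rest c
    else if !(PySem.Set.contains s i) then scanStep s skip rest (c + 1)
    else c

def solution (student : List Int) (k : Int) : Int :=
  let n : Int := student.length
  let index := (PySem.List.pyRange 0 n 1).foldl
      (fun acc i => if PySem.List.pyGetD student i 0 == 1 then acc ++ [i] else acc) []
  let indexSet : PySem.Set Int := PySem.Set.ofList index
  let nIndex : Int := index.length
  if nIndex < k then 0
  else
    let group := (PySem.List.pyRange 0 (nIndex - k + 1) 1).foldl
        (fun acc i => acc ++ [(PySem.List.pyRange 0 k 1).foldl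
            (fun gl j => gl ++ [PySem.List.pyGetD index (i + j) 0]) []]) []
    group.foldl (fun count g =>
      let first := PySem.List.pyGetD g 0 0
      let last := PySem.List.pyGetD g (-1) 0
      let countLeft := scanStep indexSet first (PySem.List.pyRange first (-1) (-1)) 1
      let countRight := scanStep indexSet last (PySem.List.pyRange last n 1) 1
      count + countLeft * countRight) 0

-- ===== PORT B =====
def solution_alt (student : List Int) (k : Int) : Int :=
  let n : Int := student.length
  let idx := (PySem.List.pyRange 0 n 1).filter
      (fun i => PySem.List.pyGetD student i 0 == 1)
  let m : Int := idx.length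
  if m < k then 0
  else
    (PySem.List.pyRange 0 (m - k + 1) 1).foldl (fun total i =>
      let left := if 0 < i then PySem.List.pyGetD idx i 0 - PySem.List.pyGetD idx (i - 1) 0
                  else PySem.List.pyGetD idx 0 0 + 1
      let j := i + k - 1
      let right := if j + 1 < m then PySem.List.pyGetD idx (j + 1) 0 - PySem.List.pyGetD idx j 0
                   else n - PySem.List.pyGetD idx j 0
      total + left * right) 0

-- ===== PRECONDITION & SPEC =====
-- Pre_ excludes exactly k ≤ 0, on which A always raises IndexError (g[0] on an empty window).
def Pre_solution (student : List Int) (k : Int) : Prop := 1 ≤ k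
instance (student : List Int) (k : Int) : Decidable (Pre_solution student k) := by
  unfold Pre_solution; infer_instance

def pvWitness_solution : List Int × Int := ([0, 1, 1, 0, 1], 2)

def Spec_solution (student : List Int) (k : Int) (out : Int) : Prop := out = solution_alt student k
instance (student : List Int) (k : Int) (out : Int) : Decidable (Spec_solution student k out) := by
  unfold Spec_solution; infer_instance

-- ===== CLAIM (what is proved, stated in full; the proofs are below) =====
def Claim_equal_solution : Prop := ∀ (student : List Int) (k : Int), Dom_solution student k → Pre_solution student k → Spec_solution student k (solution student k)

-- ===== LEMMAS AND PROOFS =====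

theorem scanStep_down_hit (s : PySem.Set Int) (skip p : Int)
    (h0 : 0 ≤ p) (hp : PySem.Set.contains s p = true) :
    ∀ (t c : Int), p ≤ t → t < skip →
    (∀ j, p < j → j ≤ t → PySem.Set.contains s j = false) →
    scanStep s skip (PySem.List.pyRange t (-1) (-1)) c = c + (t - p) := by
  have main : ∀ (d : Nat) (t c : Int), (t - p).toNat = d → p ≤ t → t < skip →
      (∀ j, p < j → j ≤ t → PySem.Set.contains s j = false) →
      scanStep s skip (PySem.List.pyRange t (-1) (-1)) c = c + (t - p) := by
    intro d
    induction d with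
    | zero =>
      intro t c hd htp hts hgap
      have ht : t = p := by omega
      subst ht
      rw [PySem.List.pyRange_neg_one_cons (by omega : (-1:Int) < t)]
      simp only [scanStep]
      rw [if_neg (by omega : ¬ t = skip), if_neg (by rw [hp]; simp)]
      omega
    | succ r ih =>
      intro t c hd htp hts hgap
      have hpt : p < t := by omega
      rw [PySem.List.pyRange_neg_one_cons (by omega : (-1:Int) < t)]
      have ht : PySem.Set.contains s t = false := hgap t hpt le_rfl
      simp only [scanStep]
      rw [if_neg (by omega : ¬ t = skip), if_pos (by rw [ht]; simp)]
      rw [ih (t-1) (c+1) (by omega) (by omega) (by omega)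
        (fun j h1 h2 => hgap j h1 (by omega))]
      ring
  intro t c h1 h2 h3; exact main (t - p).toNat t c rfl h1 h2 h3

theorem scanStep_down_none (s : PySem.Set Int) (skip : Int) :
    ∀ (t c : Int), -1 ≤ t → t < skip →
    (∀ j, 0 ≤ j → j ≤ t → PySem.Set.contains s j = false) →
    scanStep s skip (PySem.List.pyRange t (-1) (-1)) c = c + (t + 1) := by
  have main : ∀ (d : Nat) (t c : Int), (t + 1).toNat = d → -1 ≤ t → t < skip →
      (∀ j, 0 ≤ j → j ≤ t → PySem.Set.contains s j = false) →
      scanStep s skip (PySem.List.pyRange t (-1) (-1)) c = c + (t + 1) := by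
    intro d
    induction d with
    | zero =>
      intro t c hd htp hts hgap
      have ht : t = -1 := by omega
      subst ht
      rw [PySem.List.pyRange_neg_one_eq_nil (by omega)]
      simp [scanStep]
    | succ r ih =>
      intro t c hd htp hts hgap
      have h0t : 0 ≤ t := by omega
      rw [PySem.List.pyRange_neg_one_cons (by omega : (-1:Int) < t)]
      have ht : PySem.Set.contains s t = false := hgap t h0t le_rfl
      simp only [scanStep]
      rw [if_neg (by omega : ¬ t = skip), if_pos (by rw [ht]; simp)]
      rw [ih (t-1) (c+1) (by omega) (by omega) (by omega)
        (fun j h1 h2 => hgap j h1 (by omega))]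
      ring
  intro t c h1 h2 h3; exact main (t + 1).toNat t c rfl h1 h2 h3

theorem scanStep_up_hit (s : PySem.Set Int) (skip q nn : Int)
    (hq : PySem.Set.contains s q = true) (hqn : q < nn) :
    ∀ (t c : Int), t ≤ q → skip < t →
    (∀ j, t ≤ j → j < q → PySem.Set.contains s j = false) →
    scanStep s skip (PySem.List.pyRange t nn 1) c = c + (q - t) := by
  have main : ∀ (d : Nat) (t c : Int), (q - t).toNat = d → t ≤ q → skip < t →
      (∀ j, t ≤ j → j < q → PySem.Set.contains s j = false) →
      scanStep s skip (PySem.List.pyRange t nn 1) c = c + (q - t) := by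
    intro d
    induction d with
    | zero =>
      intro t c hd htp hts hgap
      have ht : t = q := by omega
      subst ht
      rw [PySem.List.pyRange_one_cons (by omega : t < nn)]
      simp only [scanStep]
      rw [if_neg (by omega : ¬ t = skip), if_neg (by rw [hq]; simp)]
      omega
    | succ r ih =>
      intro t c hd htp hts hgap
      have hpt : t < q := by omega
      rw [PySem.List.pyRange_one_cons (by omega : t < nn)]
      have ht : PySem.Set.contains s t = false := hgap t le_rfl hpt
      simp only [scanStep]
      rw [if_neg (by omega : ¬ t = skip), if_pos (by rw [ht]; simp)]
      rw [ih (t+1) (c+1) (by omega) (by omega) (by omega)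
        (fun j h1 h2 => hgap j (by omega) h2)]
      ring
  intro t c h1 h2 h3; exact main (q - t).toNat t c rfl h1 h2 h3

theorem scanStep_up_none (s : PySem.Set Int) (skip nn : Int) :
    ∀ (t c : Int), t ≤ nn → skip < t →
    (∀ j, t ≤ j → j < nn → PySem.Set.contains s j = false) →
    scanStep s skip (PySem.List.pyRange t nn 1) c = c + (nn - t) := by
  have main : ∀ (d : Nat) (t c : Int), (nn - t).toNat = d → t ≤ nn → skip < t →
      (∀ j, t ≤ j → j < nn → PySem.Set.contains s j = false) →
      scanStep s skip (PySem.List.pyRange t nn 1) c = c + (nn - t) := by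
    intro d
    induction d with
    | zero =>
      intro t c hd htp hts hgap
      have ht : t = nn := by omega
      subst ht
      rw [PySem.List.pyRange_one_eq_nil (by omega)]
      simp [scanStep]
    | succ r ih =>
      intro t c hd htp hts hgap
      have hpt : t < nn := by omega
      rw [PySem.List.pyRange_one_cons hpt]
      have ht : PySem.Set.contains s t = false := hgap t le_rfl hpt
      simp only [scanStep]
      rw [if_neg (by omega : ¬ t = skip), if_pos (by rw [ht]; simp)]
      rw [ih (t+1) (c+1) (by omega) (by omega) (by omega)
        (fun j h1 h2 => hgap j (by omega) h2)]
      ring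
  intro t c h1 h2 h3; exact main (nn - t).toNat t c rfl h1 h2 h3

theorem pyGetD_strictMono (l : List Int) (h : l.Pairwise (· < ·))
    {a b : Int} (h0 : 0 ≤ a) (hab : a < b) (hb : b < (l.length : Int)) :
    PySem.List.pyGetD l a 0 < PySem.List.pyGetD l b 0 := by
  rw [PySem.List.pyGetD_eq_getElem l 0 h0 (by omega), PySem.List.pyGetD_eq_getElem l 0 (by omega) hb]
  exact (List.pairwise_iff_getElem.mp h) a.toNat b.toNat (by omega) (by omega) (by omega)

theorem pyGetD_mem_of_lt (l : List Int) {a : Int} (h0 : 0 ≤ a) (ha : a < (l.length : Int)) :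
    PySem.List.pyGetD l a 0 ∈ l := by
  rw [PySem.List.pyGetD_eq_getElem l 0 h0 ha]
  exact List.getElem_mem (by omega)

theorem no_between (l : List Int) (h : l.Pairwise (· < ·))
    {a : Int} (h0 : 0 ≤ a) (ha1 : a + 1 < (l.length : Int)) :
    ∀ j, PySem.List.pyGetD l a 0 < j → j < PySem.List.pyGetD l (a + 1) 0 → j ∉ l := by
  intro j h1 h2 hj
  obtain ⟨r, hr, hrj⟩ := List.mem_iff_getElem.mp hj
  rw [PySem.List.pyGetD_eq_getElem l 0 h0 (by omega)] at h1
  rw [PySem.List.pyGetD_eq_getElem l 0 (by omega) ha1] at h2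
  have hmono := List.pairwise_iff_getElem.mp h
  by_cases hra : r ≤ a.toNat
  · have : l[r] ≤ l[a.toNat] := by
      rcases Nat.lt_or_ge r a.toNat with hlt | hge
      · exact le_of_lt (hmono r a.toNat hr (by omega) hlt)
      · have : r = a.toNat := by omega
        subst this; exact le_refl _
    omega
  · have hge : (a + 1).toNat ≤ r := by omega
    have : l[(a+1).toNat] ≤ l[r] := by
      rcases Nat.lt_or_ge (a+1).toNat r with hlt | hge2
      · exact le_of_lt (hmono (a+1).toNat r (by omega) hr hlt)
      · have : (a+1).toNat = r := by omega
        subst this; exact le_refl _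
    omega

theorem no_below (l : List Int) (h : l.Pairwise (· < ·)) (hl : 0 < (l.length : Int)) :
    ∀ j, j < PySem.List.pyGetD l 0 0 → j ∉ l := by
  intro j h1 hj
  obtain ⟨r, hr, hrj⟩ := List.mem_iff_getElem.mp hj
  rw [PySem.List.pyGetD_eq_getElem l 0 (by omega) hl] at h1
  have hmono := List.pairwise_iff_getElem.mp h
  have : l[(0:Int).toNat] ≤ l[r] := by
    rcases Nat.lt_or_ge 0 r with hlt | hge
    · exact le_of_lt (hmono 0 r (by omega) hr hlt)
    · have : (0:Int).toNat = r := by omega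
      subst this; exact le_refl _
  omega

theorem no_above (l : List Int) (h : l.Pairwise (· < ·)) :
    ∀ j, PySem.List.pyGetD l ((l.length : Int) - 1) 0 < j → j ∉ l := by
  intro j h1 hj
  obtain ⟨r, hr, hrj⟩ := List.mem_iff_getElem.mp hj
  have hl : 0 < (l.length : Int) := by
    have := List.length_pos_of_mem hj
    omega
  rw [PySem.List.pyGetD_eq_getElem l 0 (by omega) (by omega)] at h1
  have hmono := List.pairwise_iff_getElem.mp h
  have : l[r] ≤ l[((l.length : Int) - 1).toNat] := by
    rcases Nat.lt_or_ge r ((l.length : Int) - 1).toNat with hlt | hge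
    · exact le_of_lt (hmono r _ hr (by omega) hlt)
    · have : ((l.length : Int) - 1).toNat = r := by omega
      subst this; exact le_refl _
  omega

-- ===== VERDICT (by name: the statement is the Claim_ definition above) =====
theorem solution_spec : Claim_equal_solution := by
  intro student k _ hk
  unfold Pre_solution at hk
  unfold Spec_solution solution solution_alt
  dsimp only
  rw [PySem.List.foldl_append_if_eq_filter]
  simp only [List.nil_append]
  set n : Int := (student.length : Int) with hn
  set idx := (PySem.List.pyRange 0 n 1).filter
      (fun i => PySem.List.pyGetD student i 0 == 1) with hidx
  set m : Int := (idx.length : Int) with hm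
  by_cases hmk : m < k
  · rw [if_pos hmk, if_pos hmk]
  · rw [if_neg hmk, if_neg hmk]
    simp only [PySem.List.foldl_append_singleton_eq_map, List.nil_append]
    rw [List.foldl_map]
    refine PySem.List.foldl_congr_mem _ _ _ _ ?_
    intro count i hi
    rw [PySem.List.mem_pyRange_one] at hi
    obtain ⟨hi0, hiM⟩ := hi
    have hpw : idx.Pairwise (· < ·) :=
      List.Pairwise.filter _ (PySem.List.pairwise_lt_pyRange_one 0 n)
    have hbnd : ∀ x ∈ idx, 0 ≤ x ∧ x < n := by
      intro x hx
      rw [hidx, List.mem_filter] at hx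
      exact PySem.List.mem_pyRange_one.mp hx.1
    have hcontT : ∀ x ∈ idx, PySem.Set.contains (PySem.Set.ofList idx) x = true := by
      intro x hx
      rw [PySem.Set.contains_iff, PySem.Set.mem_ofList]
      exact hx
    have hcontF : ∀ x, x ∉ idx → PySem.Set.contains (PySem.Set.ofList idx) x = false := by
      intro x hx
      rcases hb : PySem.Set.contains (PySem.Set.ofList idx) x with _ | _
      · rfl
      · have hx2 : x ∈ PySem.Set.ofList idx := (PySem.Set.contains_iff _ _).mp hb
        rw [PySem.Set.mem_ofList] at hx2
        exact absurd hx2 hx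
    have hiltm : i < m := by omega
    have hj0m : i + k - 1 < m := by omega
    -- the window's first element
    have hfirst : PySem.List.pyGetD
        ((PySem.List.pyRange 0 k 1).map (fun j => PySem.List.pyGetD idx (i + j) 0)) 0 0
        = PySem.List.pyGetD idx i 0 := by
      rw [PySem.List.pyGetD_map_pyRange_of_nonneg _ _ _ _ le_rfl (by omega)]
      norm_num
    -- the window's last element
    have hrange : PySem.List.pyRange 0 k 1 = PySem.List.pyRange 0 (k-1) 1 ++ [k-1] := by
      have h := PySem.List.pyRange_one_succ_right (a := 0) (b := k-1) (by omega)
      rw [sub_add_cancel] at h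
      exact h
    have hlast : PySem.List.pyGetD
        ((PySem.List.pyRange 0 k 1).map (fun j => PySem.List.pyGetD idx (i + j) 0)) (-1) 0
        = PySem.List.pyGetD idx (i + k - 1) 0 := by
      rw [hrange, List.map_append, List.map_singleton,
        PySem.List.pyGetD_neg_one_append_singleton]
      congr 1
      ring
    rw [hfirst, hlast]
    have hFmem : PySem.List.pyGetD idx i 0 ∈ idx := pyGetD_mem_of_lt idx hi0 (by omega)
    have hF0 : 0 ≤ PySem.List.pyGetD idx i 0 := (hbnd _ hFmem).1
    have hLmem : PySem.List.pyGetD idx (i + k - 1) 0 ∈ idx :=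
      pyGetD_mem_of_lt idx (by omega) (by omega)
    have hLn : PySem.List.pyGetD idx (i + k - 1) 0 < n := (hbnd _ hLmem).2
    -- left scan = gap arithmetic
    have hcl : scanStep (PySem.Set.ofList idx) (PySem.List.pyGetD idx i 0)
        (PySem.List.pyRange (PySem.List.pyGetD idx i 0) (-1) (-1)) 1
        = (if 0 < i then PySem.List.pyGetD idx i 0 - PySem.List.pyGetD idx (i - 1) 0
           else PySem.List.pyGetD idx 0 0 + 1) := by
      rw [PySem.List.pyRange_neg_one_cons (by omega : (-1:Int) < PySem.List.pyGetD idx i 0)]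
      simp only [scanStep]
      rw [if_pos trivial]
      by_cases hip : 0 < i
      · have hPmem : PySem.List.pyGetD idx (i-1) 0 ∈ idx :=
          pyGetD_mem_of_lt idx (by omega) (by omega)
        have hPF : PySem.List.pyGetD idx (i-1) 0 < PySem.List.pyGetD idx i 0 :=
          pyGetD_strictMono idx hpw (by omega) (by omega) (by omega)
        rw [scanStep_down_hit (PySem.Set.ofList idx) (PySem.List.pyGetD idx i 0)
            (PySem.List.pyGetD idx (i-1) 0) (hbnd _ hPmem).1 (hcontT _ hPmem)
            (PySem.List.pyGetD idx i 0 - 1) 1 (by omega) (by omega) ?_]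
        · rw [if_pos hip]; ring
        · intro j h1 h2
          apply hcontF
          have hnb := no_between idx hpw (a := i - 1) (by omega) (by omega)
          rw [(by omega : i - 1 + 1 = i)] at hnb
          exact hnb j h1 (by omega)
      · have hieq : i = 0 := by omega
        rw [scanStep_down_none (PySem.Set.ofList idx) (PySem.List.pyGetD idx i 0)
            (PySem.List.pyGetD idx i 0 - 1) 1 (by omega) (by omega) ?_]
        · rw [if_neg hip, hieq]; ring
        · intro j h1 h2
          apply hcontF
          apply no_below idx hpw (by omega) j
          have hFe : PySem.List.pyGetD idx 0 0 = PySem.List.pyGetD idx i 0 := by rw [hieq]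
          omega
    -- right scan = gap arithmetic
    have hcr : scanStep (PySem.Set.ofList idx) (PySem.List.pyGetD idx (i + k - 1) 0)
        (PySem.List.pyRange (PySem.List.pyGetD idx (i + k - 1) 0) n 1) 1
        = (if i + k - 1 + 1 < m
           then PySem.List.pyGetD idx (i + k - 1 + 1) 0 - PySem.List.pyGetD idx (i + k - 1) 0
           else n - PySem.List.pyGetD idx (i + k - 1) 0) := by
      rw [PySem.List.pyRange_one_cons hLn]
      simp only [scanStep]
      rw [if_pos trivial]
      by_cases hjp : i + k - 1 + 1 < m
      · have hQmem : PySem.List.pyGetD idx (i + k - 1 + 1) 0 ∈ idx :=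
          pyGetD_mem_of_lt idx (by omega) (by omega)
        have hLQ : PySem.List.pyGetD idx (i + k - 1) 0 < PySem.List.pyGetD idx (i + k - 1 + 1) 0 :=
          pyGetD_strictMono idx hpw (by omega) (by omega) (by omega)
        rw [scanStep_up_hit (PySem.Set.ofList idx) (PySem.List.pyGetD idx (i + k - 1) 0)
            (PySem.List.pyGetD idx (i + k - 1 + 1) 0) n (hcontT _ hQmem) (hbnd _ hQmem).2
            (PySem.List.pyGetD idx (i + k - 1) 0 + 1) 1 (by omega) (by omega) ?_]
        · rw [if_pos hjp]; ring
        · intro j h1 h2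
          apply hcontF
          exact no_between idx hpw (a := i + k - 1) (by omega) (by omega) j (by omega) h2
      · have hjeq : i + k - 1 = m - 1 := by omega
        rw [scanStep_up_none (PySem.Set.ofList idx) (PySem.List.pyGetD idx (i + k - 1) 0) n
            (PySem.List.pyGetD idx (i + k - 1) 0 + 1) 1 (by omega) (by omega) ?_]
        · rw [if_neg hjp]; ring
        · intro j h1 h2
          apply hcontF
          apply no_above idx hpw j
          rw [hm] at hjeq
          rw [← hjeq]
          omega
    rw [hcl, hcr]
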